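-- pv_equiv track=rewrite | github.com/angelaxu76/TaobaoProj | brands/reiss/core/reiss_product_fetcher.py | _detect_size_schema
-- ===== SOURCE A (Python) =====
-- from typing import Dict, List, Tuple, Optional
--
-- ALPHA_ORDER = ["XXS", "XS", "S", "M", "L", "XL", "XXL", "One Size"]
--
-- ALPHA_RANGE   = ["XS", "S", "M", "L", "XL"]
--
-- def _detect_size_schema(size_keys: List[str]) -> str:
--     has_num   = any(k.isdigit() for k in size_keys)
--     has_alpha = any(k in ALPHA_ORDER or k in ALPHA_RANGE for k in size_keys)
--     if has_num and not has_alpha: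
--         return "numeric"
--     if has_alpha and not has_num:
--         return "alpha"
--     if has_num and has_alpha:
--         num_cnt = sum(1 for k in size_keys if k.isdigit())
--         alp_cnt = sum(1 for k in size_keys if k in ALPHA_ORDER or k in ALPHA_RANGE)
--         return "numeric" if num_cnt >= alp_cnt else "alpha"
--     return "unknown"
-- ===== SOURCE B (Python) =====
-- from typing import List
--
-- ALPHA_ORDER = ["XXS", "XS", "S", "M", "L", "XL", "XXL", "One Size"]
--
-- ALPHA_RANGE   = ["XS", "S", "M", "L", "XL"]
--
-- def _detect_size_schema(size_keys: List[str]) -> str: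
--     # single counting pass; the counts alone decide the schema
--     num_cnt = 0
--     alp_cnt = 0
--     for k in size_keys:
--         if k.isdigit():
--             num_cnt += 1
--         if k in ALPHA_ORDER or k in ALPHA_RANGE:
--             alp_cnt += 1
--     if num_cnt == 0 and alp_cnt == 0:
--         return "unknown"
--     return "numeric" if num_cnt >= alp_cnt else "alpha"
-- ===== Notes on version B (the rewrite author's own statement) =====
-- stated objective: simpler
-- what changed: Replaced A's two any() passes plus a conditional pair of recount passes with one loop maintaining two counters and a single three-way decision on the counts.
import Mathlib
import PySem

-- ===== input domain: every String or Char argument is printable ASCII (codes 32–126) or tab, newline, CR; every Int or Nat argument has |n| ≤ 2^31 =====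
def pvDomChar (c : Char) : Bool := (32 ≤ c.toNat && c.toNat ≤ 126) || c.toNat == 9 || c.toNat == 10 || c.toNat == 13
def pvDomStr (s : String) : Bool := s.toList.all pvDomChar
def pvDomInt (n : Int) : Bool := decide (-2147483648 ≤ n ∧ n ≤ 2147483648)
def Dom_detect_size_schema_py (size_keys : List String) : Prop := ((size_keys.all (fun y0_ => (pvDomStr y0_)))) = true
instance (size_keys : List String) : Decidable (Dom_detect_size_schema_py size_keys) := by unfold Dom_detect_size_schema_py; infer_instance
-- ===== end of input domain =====

-- B replaces A's two any() passes plus conditional recount with one counting pass and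
-- a single decision on the two counts (objective: simpler).

-- ===== PORT A =====
def pvALPHA_ORDER : List String := ["XXS", "XS", "S", "M", "L", "XL", "XXL", "One Size"]
def pvALPHA_RANGE : List String := ["XS", "S", "M", "L", "XL"]

def pvIsAlpha (k : String) : Bool := pvALPHA_ORDER.contains k || pvALPHA_RANGE.contains k

def detect_size_schema_py (size_keys : List String) : String :=
  let has_num := size_keys.any (fun k => PySem.Str.strIsdigit k)
  let has_alpha := size_keys.any (fun k => pvIsAlpha k)
  if has_num && !has_alpha then "numeric"
  else if has_alpha && !has_num then "alpha"
  else if has_num && has_alpha then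
    let num_cnt := (size_keys.filter (fun k => PySem.Str.strIsdigit k)).length
    let alp_cnt := (size_keys.filter (fun k => pvIsAlpha k)).length
    if alp_cnt ≤ num_cnt then "numeric" else "alpha"
  else "unknown"

-- ===== PORT B =====
def detect_size_schema_py_alt (size_keys : List String) : String :=
  let c := size_keys.foldl
    (fun (c : Nat × Nat) k =>
      ((if PySem.Str.strIsdigit k then c.1 + 1 else c.1),
       (if pvIsAlpha k then c.2 + 1 else c.2)))
    (0, 0)
  if c.1 = 0 ∧ c.2 = 0 then "unknown"
  else if c.2 ≤ c.1 then "numeric" else "alpha"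

-- ===== PRECONDITION & SPEC =====
def Spec_detect_size_schema_py (size_keys : List String) (out : String) : Prop := out = detect_size_schema_py_alt size_keys
instance (size_keys : List String) (out : String) : Decidable (Spec_detect_size_schema_py size_keys out) := by unfold Spec_detect_size_schema_py; infer_instance

-- ===== CLAIM (what is proved, stated in full; the proofs are below) =====
def Claim_equal_detect_size_schema_py : Prop := ∀ (size_keys : List String), Dom_detect_size_schema_py size_keys → Spec_detect_size_schema_py size_keys (detect_size_schema_py size_keys)

-- ===== LEMMAS AND PROOFS =====

-- B's fold computes the two counts A obtains by filtering.
theorem pv_fold_counts (l : List String) (a b : Nat) :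
    l.foldl
      (fun (c : Nat × Nat) k =>
        ((if PySem.Str.strIsdigit k then c.1 + 1 else c.1),
         (if pvIsAlpha k then c.2 + 1 else c.2)))
      (a, b)
    = (a + l.countP (fun k => PySem.Str.strIsdigit k),
       b + l.countP (fun k => pvIsAlpha k)) := by
  induction l generalizing a b with
  | nil => simp
  | cons h t ih =>
    simp only [List.foldl_cons, List.countP_cons]
    split_ifs <;>
      simp only [ih, Prod.mk.injEq] <;>
      constructor <;> omega

theorem pv_any_eq_decide (l : List String) (p : String → Bool) :
    l.any p = decide (l.countP p ≠ 0) := by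
  by_cases hc : l.countP p = 0
  · simp only [hc, ne_eq, not_true_eq_false, decide_false]
    rw [List.any_eq_false]
    intro x hx
    simp [List.countP_eq_zero.mp hc x hx]
  · simp only [hc, ne_eq, not_false_eq_true, decide_true]
    rw [List.any_eq_true]
    rcases List.countP_pos_iff.mp (Nat.pos_of_ne_zero hc) with ⟨x, hx, hpx⟩
    exact ⟨x, hx, hpx⟩

-- ===== VERDICT (by name: the statement is the Claim_ definition above) =====
theorem detect_size_schema_py_spec : Claim_equal_detect_size_schema_py := by
  intro l _
  unfold Spec_detect_size_schema_py detect_size_schema_py detect_size_schema_py_alt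
  simp only [pv_fold_counts, Nat.zero_add, ← List.countP_eq_length_filter, pv_any_eq_decide,
    Bool.and_eq_true, Bool.not_eq_true', decide_eq_false_iff_not, decide_eq_true_eq, not_not]
  split_ifs <;> first | rfl | omega
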